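-- pv_equiv track=rewrite | github.com/HunnyMhoo/FundAutoPilot | backend/app/services/compare_service.py | select_default_class
-- ===== SOURCE A (Python) =====
-- from typing import Any
--
-- def select_default_class(fund_abbr: str | None, class_list: list[dict[str, Any]]) -> str | None:
--     """
--     Select default class for a fund using deterministic rules.
--
--     Priority:
--     1. Match fund_abbr to class_abbr_name (exact match)
--     2. Prefer class_abbr_name that is None, "-", or "main" (fund-level)
--     3. Otherwise, take first alphabetically by class_abbr_name
--
--     Args:
--         fund_abbr: Fund abbreviation to match
--         class_list: List of dicts with class_abbr_name field
--
--     Returns: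
--         Selected class_abbr_name string, or None if no classes available
--     """
--     if not class_list:
--         return None
--
--     # Priority 1: Exact match with fund_abbr
--     if fund_abbr:
--         for item in class_list:
--             class_abbr = item.get("class_abbr_name")
--             if class_abbr and class_abbr.lower() == fund_abbr.lower():
--                 return class_abbr
--
--     # Priority 2: Fund-level classes (None, "-", "main")
--     fund_level_classes = [None, "-", "main"]
--     for item in class_list:
--         class_abbr = item.get("class_abbr_name")
--         if class_abbr in fund_level_classes or (class_abbr and class_abbr.lower() == "main"):
--             return class_abbr
--
--     # Priority 3: First alphabetically
--     sorted_classes = sorted(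
--         [item for item in class_list if item.get("class_abbr_name")],
--         key=lambda x: x.get("class_abbr_name", "")
--     )
--     if sorted_classes:
--         return sorted_classes[0].get("class_abbr_name")
--
--     # Fallback: first item's class_abbr_name
--     if class_list:
--         return class_list[0].get("class_abbr_name")
--
--     return None
-- ===== SOURCE B (Python) =====
-- def select_default_class(fund_abbr, class_list):
--     """One pass over class_list keeping three accumulators (first exact match,
--     first fund-level class, alphabetical minimum), then pick by priority."""
--     if not class_list:
--         return None
--     want = fund_abbr.lower() if fund_abbr else None
--     first_exact = None
--     fund_found = False
--     fund_val = None
--     best_alpha = None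
--     for item in class_list:
--         ca = item.get("class_abbr_name")
--         if first_exact is None and want is not None and ca and ca.lower() == want:
--             first_exact = ca
--         if not fund_found and (ca in (None, "-", "main") or (ca and ca.lower() == "main")):
--             fund_found = True
--             fund_val = ca
--         if ca and (best_alpha is None or ca < best_alpha):
--             best_alpha = ca
--     if first_exact is not None:
--         return first_exact
--     if fund_found:
--         return fund_val
--     if best_alpha is not None:
--         return best_alpha
--     return class_list[0].get("class_abbr_name")
-- ===== Notes on version B (the rewrite author's own statement) =====
-- stated objective: alternative
-- what changed: Replaces A's three sequential passes plus a stable sort of the filtered list by a single loop over class_list that accumulates the first exact match, the first fund-level class and the running alphabetical minimum, then picks by priority.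
import Mathlib
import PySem

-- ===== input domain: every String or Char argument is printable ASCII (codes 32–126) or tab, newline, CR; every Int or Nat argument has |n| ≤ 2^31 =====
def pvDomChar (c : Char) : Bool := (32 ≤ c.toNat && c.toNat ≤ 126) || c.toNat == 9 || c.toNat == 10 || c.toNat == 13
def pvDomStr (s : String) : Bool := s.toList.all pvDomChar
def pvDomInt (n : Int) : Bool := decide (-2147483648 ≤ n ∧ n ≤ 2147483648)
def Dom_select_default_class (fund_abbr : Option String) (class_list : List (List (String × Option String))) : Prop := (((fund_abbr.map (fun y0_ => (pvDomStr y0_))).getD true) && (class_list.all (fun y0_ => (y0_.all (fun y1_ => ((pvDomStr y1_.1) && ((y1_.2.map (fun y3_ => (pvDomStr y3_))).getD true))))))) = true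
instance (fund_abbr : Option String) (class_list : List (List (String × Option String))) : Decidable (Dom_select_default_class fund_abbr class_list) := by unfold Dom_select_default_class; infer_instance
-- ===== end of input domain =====

-- B replaces A's three passes + stable sort by one accumulating loop (alternative decomposition, same results).

-- item.get("class_abbr_name") — shared dict-access primitive
def pvGet (item : List (String × Option String)) : Option String :=
  (PySem.Dict.mk item).getD "class_abbr_name" none

-- ===== PORT A =====
-- `class_abbr and …` truthiness of an Optional[str]
def pvTruthyA (ca : Option String) : Bool :=
  match ca with
  | some s => !(s == "")
  | none => false

-- Priority-1 loop: first truthy class_abbr with class_abbr.lower() == fund_abbr.lower()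
def pvP1 (fa : String) : List (List (String × Option String)) → Option String
  | [] => none
  | item :: rest =>
    match pvGet item with
    | some s => if !(s == "") && (PySem.Str.lower s == PySem.Str.lower fa) then some s
                else pvP1 fa rest
    | none => pvP1 fa rest

-- `class_abbr in [None, "-", "main"] or (class_abbr and class_abbr.lower() == "main")`
def pvFundLevelA (ca : Option String) : Bool :=
  ca == none || ca == some "-" || ca == some "main" ||
    (pvTruthyA ca && (PySem.Str.lower (ca.getD "") == "main"))

-- Priority-2 loop: first fund-level item; `some ca` means "returned ca" (ca itself may be none)
def pvP2 : List (List (String × Option String)) → Option (Option String)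
  | [] => none
  | item :: rest =>
    let ca := pvGet item
    if pvFundLevelA ca then some ca else pvP2 rest

def select_default_class (fund_abbr : Option String) (class_list : List (List (String × Option String))) : Option String :=
  if class_list = [] then none
  else
    let p1 : Option String :=
      match fund_abbr with
      | some fa => if fa == "" then none else pvP1 fa class_list
      | none => none
    match p1 with
    | some r => some r
    | none =>
      match pvP2 class_list with
      | some ca => ca
      | none =>
        let sortedClasses :=
          PySem.List.sorted (class_list.filter (fun item => pvTruthyA (pvGet item)))
            (fun x => (pvGet x).getD "")
        match sortedClasses with
        | item :: _ => pvGet item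
        | [] =>
          match class_list with
          | item :: _ => pvGet item
          | [] => none

-- ===== PORT B =====
-- predicate of B's exact-match accumulator
def pvIsMatch (want : Option String) (ca : Option String) : Bool :=
  match want, ca with
  | some w, some s => !(s == "") && (PySem.Str.lower s == w)
  | _, _ => false

-- predicate of B's fund-level accumulator
def pvIsFund (ca : Option String) : Bool :=
  match ca with
  | none => true
  | some s => s == "-" || s == "main" || (!(s == "") && (PySem.Str.lower s == "main"))

-- one loop body updating (first_exact, fund_found, fund_val, best_alpha)
def pvStep (want : Option String)
    (st : Option String × Bool × Option String × Option String)
    (item : List (String × Option String)) :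
    Option String × Bool × Option String × Option String :=
  match st with
  | (fe, ff, fv, ba) =>
    let ca := pvGet item
    let fe' := if fe.isNone && pvIsMatch want ca then ca else fe
    let ff' := ff || pvIsFund ca
    let fv' := if !ff && pvIsFund ca then ca else fv
    let ba' :=
      match pvGet item, ba with
      | some s, some b => if !(s == "") && decide (s < b) then some s else some b
      | some s, none => if !(s == "") then some s else none
      | none, _ => ba
    (fe', ff', fv', ba')

def select_default_class_alt (fund_abbr : Option String) (class_list : List (List (String × Option String))) : Option String :=
  if class_list = [] then none
  else
    let want : Option String :=
      match fund_abbr with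
      | some fa => if fa == "" then none else some (PySem.Str.lower fa)
      | none => none
    match class_list.foldl (pvStep want) (none, false, none, none) with
    | (some e, _, _, _) => some e
    | (none, true, fv, _) => fv
    | (none, false, _, some b) => some b
    | (none, false, _, none) =>
      match class_list with
      | item :: _ => pvGet item
      | [] => none

-- ===== PRECONDITION & SPEC =====
def Spec_select_default_class (fund_abbr : Option String) (class_list : List (List (String × Option String))) (out : Option String) : Prop := out = select_default_class_alt fund_abbr class_list
instance (fund_abbr : Option String) (class_list : List (List (String × Option String))) (out : Option String) : Decidable (Spec_select_default_class fund_abbr class_list out) := by unfold Spec_select_default_class; infer_instance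

-- ===== CLAIM (what is proved, stated in full; the proofs are below) =====
def Claim_equal_select_default_class : Prop := ∀ (fund_abbr : Option String) (class_list : List (List (String × Option String))), Dom_select_default_class fund_abbr class_list → Spec_select_default_class fund_abbr class_list (select_default_class fund_abbr class_list)

-- ===== LEMMAS AND PROOFS =====

-- proof-side views of the three accumulators
def pvFindExact (want : Option String) : List (List (String × Option String)) → Option String
  | [] => none
  | i :: r => if pvIsMatch want (pvGet i) then pvGet i else pvFindExact want r

def pvFF : List (List (String × Option String)) → Option (Option String)
  | [] => none
  | i :: r => if pvIsFund (pvGet i) then some (pvGet i) else pvFF r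

def pvMin : List (List (String × Option String)) → Option String → Option String
  | [], ba => ba
  | i :: r, ba =>
    pvMin r
      (match pvGet i, ba with
       | some s, some b => if !(s == "") && decide (s < b) then some s else some b
       | some s, none => if !(s == "") then some s else none
       | none, _ => ba)

theorem pv_foldl_step (want : Option String) (l : List (List (String × Option String)))
    (fe : Option String) (ff : Bool) (fv ba : Option String) :
    l.foldl (pvStep want) (fe, ff, fv, ba) =
      ((match fe with | some e => some e | none => pvFindExact want l),
       ff || (pvFF l).isSome,
       (if ff then fv else match pvFF l with | some ca => ca | none => fv),
       pvMin l ba) := by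
  induction l generalizing fe ff fv ba with
  | nil => cases fe <;> simp [pvFindExact, pvFF, pvMin]
  | cons i r ih =>
    simp only [List.foldl_cons, pvStep]
    rw [ih]
    cases hca : pvGet i with
    | none =>
      have hm : pvIsMatch want none = false := by cases want <;> rfl
      cases fe <;> cases ff <;>
        simp [pvFindExact, pvFF, pvMin, hca, hm, pvIsFund]
    | some s =>
      cases fe <;> cases ff <;>
        cases hmm : pvIsMatch want (some s) <;>
        cases hff : pvIsFund (some s) <;>
        simp_all [pvFindExact, pvFF, pvMin, pvIsMatch]

-- the two fund-level predicates agree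
theorem pvIsFund_eq (ca : Option String) : pvIsFund ca = pvFundLevelA ca := by
  cases ca <;> simp [pvIsFund, pvFundLevelA, pvTruthyA]

theorem pvFF_eq_pvP2 (l : List (List (String × Option String))) : pvFF l = pvP2 l := by
  induction l with
  | nil => rfl
  | cons i r ih => simp [pvFF, pvP2, pvIsFund_eq, ih]

-- A's priority-1 loop is B's exact-match accumulator
theorem pvP1_eq_findExact (fa : String) (l : List (List (String × Option String))) :
    pvP1 fa l = pvFindExact (some (PySem.Str.lower fa)) l := by
  induction l with
  | nil => rfl
  | cons i r ih =>
    cases hca : pvGet i with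
    | none => simp [pvP1, pvFindExact, hca, pvIsMatch, ih]
    | some s => simp [pvP1, pvFindExact, hca, pvIsMatch, ih]

theorem pvFindExact_none (l : List (List (String × Option String))) :
    pvFindExact none l = none := by
  induction l with
  | nil => rfl
  | cons i r ih => simp [pvFindExact, pvIsMatch, ih]

-- the truthy class_abbr values, in order
def pvVal (i : List (String × Option String)) : Option String :=
  match pvGet i with
  | some s => if s == "" then none else some s
  | none => none

def pvOmin : List String → Option String → Option String
  | [], ba => ba
  | s :: r, ba =>
    pvOmin r (match ba with
      | none => some s
      | some b => if s < b then some s else some b)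

theorem pvMin_eq_omin (l : List (List (String × Option String))) (ba : Option String) :
    pvMin l ba = pvOmin (l.filterMap pvVal) ba := by
  induction l generalizing ba with
  | nil => rfl
  | cons i r ih =>
    cases hca : pvGet i with
    | none => simp [pvMin, pvVal, hca, ih]
    | some s =>
      by_cases hs : s = ""
      · cases ba <;> simp [pvMin, pvVal, hca, hs, ih]
      · cases ba <;> simp [pvMin, pvVal, pvOmin, hca, hs, ih]

theorem pvOmin_eq_none (xs : List String) (ba : Option String)
    (h : pvOmin xs ba = none) : xs = [] ∧ ba = none := by
  induction xs generalizing ba with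
  | nil => exact ⟨rfl, h⟩
  | cons s r ih =>
    simp only [pvOmin] at h
    have h2 := (ih _ h).2
    cases ba with
    | none => simp at h2
    | some b => by_cases hlt : s < b <;> simp [hlt] at h2

theorem pvOmin_spec (xs : List String) (ba : Option String) (m : String)
    (h : pvOmin xs ba = some m) :
    (m ∈ xs ∨ ba = some m) ∧ (∀ y ∈ xs, m ≤ y) ∧ (∀ y, ba = some y → m ≤ y) := by
  induction xs generalizing ba with
  | nil =>
    simp only [pvOmin] at h
    exact ⟨Or.inr h, by simp, fun y hy => by simp_all⟩
  | cons s r ih =>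
    simp only [pvOmin] at h
    cases ba with
    | none =>
      obtain ⟨h1, h2, h3⟩ := ih _ h
      refine ⟨?_, ?_, by simp⟩
      · rcases h1 with h1 | h1
        · exact Or.inl (List.mem_cons_of_mem _ h1)
        · exact Or.inl (by simp_all)
      · intro y hy
        rcases List.mem_cons.mp hy with rfl | hy
        · exact h3 _ rfl
        · exact h2 _ hy
    | some b0 =>
      by_cases hlt : s < b0
      · simp only [if_pos hlt] at h
        obtain ⟨h1, h2, h3⟩ := ih _ h
        refine ⟨?_, ?_, ?_⟩
        · rcases h1 with h1 | h1
          · exact Or.inl (List.mem_cons_of_mem _ h1)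
          · exact Or.inl (by simp_all)
        · intro y hy
          rcases List.mem_cons.mp hy with rfl | hy
          · exact h3 _ rfl
          · exact h2 _ hy
        · intro y hy
          have hby : y = b0 := by simp_all
          exact le_trans (h3 _ rfl) (le_of_lt (hby ▸ hlt))
      · simp only [if_neg hlt] at h
        obtain ⟨h1, h2, h3⟩ := ih _ h
        refine ⟨?_, ?_, ?_⟩
        · rcases h1 with h1 | h1
          · exact Or.inl (List.mem_cons_of_mem _ h1)
          · exact Or.inr h1
        · intro y hy
          rcases List.mem_cons.mp hy with rfl | hy
          · exact le_trans (h3 _ rfl) (le_of_not_gt hlt)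
          · exact h2 _ hy
        · exact h3

-- truthy values = keys of the filtered list
theorem pvVals_eq_map_key (l : List (List (String × Option String))) :
    l.filterMap pvVal
      = (l.filter (fun i => pvTruthyA (pvGet i))).map (fun x => (pvGet x).getD "") := by
  induction l with
  | nil => rfl
  | cons i r ih =>
    cases hca : pvGet i with
    | none =>
      have h1 : pvVal i = none := by simp [pvVal, hca]
      have h2 : pvTruthyA (pvGet i) = false := by simp [pvTruthyA, hca]
      simp [h1, h2, ih]
    | some s =>
      by_cases hs : s = ""
      · have h1 : pvVal i = none := by simp [pvVal, hca, hs]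
        have h2 : pvTruthyA (pvGet i) = false := by simp [pvTruthyA, hca, hs]
        simp [h1, h2, ih]
      · have h1 : pvVal i = some s := by simp [pvVal, hca, hs]
        have h2 : pvTruthyA (pvGet i) = true := by simp [pvTruthyA, hca, hs]
        simp [h1, ih, hca, pvTruthyA, hs]

theorem pv_core (want : Option String) (class_list : List (List (String × Option String))) :
    (match pvFindExact want class_list with
     | some r => some r
     | none =>
       match pvP2 class_list with
       | some ca => ca
       | none =>
         match PySem.List.sorted (class_list.filter (fun item => pvTruthyA (pvGet item)))
             (fun x => (pvGet x).getD "") with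
         | item :: _ => pvGet item
         | [] => match class_list with | item :: _ => pvGet item | [] => none) =
    (match class_list.foldl (pvStep want) (none, false, none, none) with
     | (some e, _, _, _) => some e
     | (none, true, fv, _) => fv
     | (none, false, _, some b) => some b
     | (none, false, _, none) =>
       match class_list with | item :: _ => pvGet item | [] => none) := by
  rw [pv_foldl_step]
  cases hfe : pvFindExact want class_list with
  | some r => simp
  | none =>
    simp only []
    rw [← pvFF_eq_pvP2]
    cases hff : pvFF class_list with
    | some ca => simp
    | none =>
      simp only [Option.isSome_none, Bool.or_false]
      rw [pvMin_eq_omin, pvVals_eq_map_key]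
      set F := class_list.filter (fun i => pvTruthyA (pvGet i)) with hF
      cases hs : PySem.List.sorted F (fun x => (pvGet x).getD "") with
      | nil =>
        have hFnil : F = [] := (PySem.List.sorted_eq_nil_iff _ _ _).mp hs
        rw [hFnil]
        simp only [List.map_nil, pvOmin]
      | cons item t =>
        have hFne : F ≠ [] := by
          intro h; rw [h] at hs; simp [PySem.List.sorted]  at hs
        have hmem : item ∈ F := by
          have : item ∈ PySem.List.sorted F (fun x => (pvGet x).getD "") := by
            rw [hs]; exact List.mem_cons_self
          exact (PySem.List.mem_sorted _ _ _ _).mp this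
        have hkey : ∀ y ∈ F, (pvGet item).getD "" ≤ (pvGet y).getD "" :=
          PySem.List.key_head_sorted_le _ _ hs
        obtain ⟨m, hget, hmne⟩ : ∃ m, pvGet item = some m ∧ m ≠ "" := by
          have htr : pvTruthyA (pvGet item) = true := (List.mem_filter.mp hmem).2
          cases h0 : pvGet item with
          | none => rw [h0] at htr; simp [pvTruthyA] at htr
          | some s =>
            refine ⟨s, rfl, ?_⟩
            rw [h0] at htr; simpa [pvTruthyA] using htr
        have hkm : (fun x => (pvGet x).getD "") item = m := by simp [hget]
        cases hmin : pvOmin (F.map fun x => (pvGet x).getD "") none with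
        | none =>
          have : F = [] := by simpa using (pvOmin_eq_none _ _ hmin).1
          exact absurd this hFne
        | some b =>
          obtain ⟨h1, h2, _⟩ := pvOmin_spec _ _ _ hmin
          have hbm : b = m := by
            have hmb : m ≤ b := by
              rcases h1 with h1 | h1
              · obtain ⟨y, hy, hyk⟩ := List.mem_map.mp h1
                have := hkey y hy
                rw [hget] at this; simpa [hyk] using this
              · simp at h1
            have hbmle : b ≤ m := h2 _ (List.mem_map.mpr ⟨item, hmem, hkm⟩)
            exact le_antisymm hbmle hmb
          simp [hget, hbm]

-- ===== VERDICT (by name: the statement is the Claim_ definition above) =====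
theorem select_default_class_spec : Claim_equal_select_default_class := by
  intro fund_abbr class_list _
  unfold Spec_select_default_class select_default_class select_default_class_alt
  by_cases hcl : class_list = []
  · simp [hcl]
  · simp only [if_neg hcl]
    cases fund_abbr with
    | none =>
      simpa [pvFindExact_none] using pv_core none class_list
    | some fa =>
      by_cases hfa : fa = ""
      · simpa [hfa, pvFindExact_none] using pv_core none class_list
      · simpa [hfa, pvP1_eq_findExact] using
          pv_core (some (PySem.Str.lower fa)) class_list
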